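-- pv_equiv track=rewrite | github.com/JLaumen/AALpyLSharpSquare | Benchmarking/incomplete_dfa_benchmark/benchmark_incomplete_dfa.py | get_possible_words
-- ===== SOURCE A (Python) =====
-- def get_possible_words(prefix:list, suffix:list, alphabet:list) -> list:
--     words = []
--     if suffix:
--         if suffix[0] == "X":
--             for input_val in alphabet:
--                 words.extend(get_possible_words(prefix + [input_val], suffix[1:], alphabet))
--         else:
--             input_val = suffix[0]
--             words.extend(get_possible_words(prefix + [input_val], suffix[1:], alphabet))
--         return words
--     else:
--         return [prefix]
-- ===== SOURCE B (Python) =====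
-- from itertools import product
--
-- def get_possible_words(prefix: list, suffix: list, alphabet: list) -> list:
--     choices = [alphabet if s == "X" else [s] for s in suffix]
--     return [prefix + list(combo) for combo in product(*choices)]
-- ===== Notes on version B (the rewrite author's own statement) =====
-- stated objective: idiomatic
-- what changed: Replaces the recursion over the suffix (with repeated prefix copying) by a precomputed per-position choice table and a single pass over itertools.product of it.
import Mathlib
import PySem

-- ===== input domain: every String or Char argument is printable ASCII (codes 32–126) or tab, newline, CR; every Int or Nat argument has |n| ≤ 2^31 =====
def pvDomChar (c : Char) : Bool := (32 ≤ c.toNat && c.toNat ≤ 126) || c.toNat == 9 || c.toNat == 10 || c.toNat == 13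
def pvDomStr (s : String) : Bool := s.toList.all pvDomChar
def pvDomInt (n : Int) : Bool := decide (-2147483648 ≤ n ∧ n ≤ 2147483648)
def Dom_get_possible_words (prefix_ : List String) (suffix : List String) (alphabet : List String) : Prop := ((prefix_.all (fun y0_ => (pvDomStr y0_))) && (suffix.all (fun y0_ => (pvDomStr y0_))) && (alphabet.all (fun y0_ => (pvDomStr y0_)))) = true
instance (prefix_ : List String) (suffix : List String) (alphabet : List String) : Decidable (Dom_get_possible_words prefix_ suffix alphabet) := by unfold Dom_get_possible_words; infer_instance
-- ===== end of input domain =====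

-- B replaces A's recursion with an accumulated prefix by a per-position choice
-- table and one pass over its Cartesian product (idiomatic; same results).

-- ===== PORT A =====
-- A: recursion on suffix, extending words with recursive calls on prefix + [input_val].
def get_possible_words (prefix_ : List String) (suffix : List String) (alphabet : List String) : List (List String) :=
  match suffix with
  | [] => [prefix_]
  | s :: rest =>
    if s == "X" then
      alphabet.foldl
        (fun words input_val => words ++ get_possible_words (prefix_ ++ [input_val]) rest alphabet)
        []
    else
      [] ++ get_possible_words (prefix_ ++ [s]) rest alphabet

-- ===== PORT B =====
-- itertools.product(*choices), left factor outermost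
def pvProduct (choices : List (List String)) : List (List String) :=
  match choices with
  | [] => [[]]
  | c :: cs => c.flatMap (fun x => (pvProduct cs).map (fun t => x :: t))

def get_possible_words_alt (prefix_ : List String) (suffix : List String) (alphabet : List String) : List (List String) :=
  (pvProduct (suffix.map (fun s => if s == "X" then alphabet else [s]))).map
    (fun combo => prefix_ ++ combo)

-- ===== PRECONDITION & SPEC =====
def Spec_get_possible_words (prefix_ : List String) (suffix : List String) (alphabet : List String) (out : List (List String)) : Prop := out = get_possible_words_alt prefix_ suffix alphabet
instance (prefix_ : List String) (suffix : List String) (alphabet : List String) (out : List (List String)) : Decidable (Spec_get_possible_words prefix_ suffix alphabet out) := by unfold Spec_get_possible_words; infer_instance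

-- ===== CLAIM (what is proved, stated in full; the proofs are below) =====
def Claim_equal_get_possible_words : Prop := ∀ (prefix_ : List String) (suffix : List String) (alphabet : List String), Dom_get_possible_words prefix_ suffix alphabet → Spec_get_possible_words prefix_ suffix alphabet (get_possible_words prefix_ suffix alphabet)

-- ===== LEMMAS AND PROOFS =====
theorem foldl_append_recursive (alphabet : List String) (f : String → List (List String)) (init : List (List String)) :
    alphabet.foldl (fun words a => words ++ f a) init = init ++ alphabet.flatMap f := by
  induction alphabet generalizing init with
  | nil => simp
  | cons a as ih => simp [List.foldl, ih, List.flatMap_cons, List.append_assoc]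

theorem get_possible_words_eq_alt (suffix : List String) (prefix_ alphabet : List String) :
    get_possible_words prefix_ suffix alphabet = get_possible_words_alt prefix_ suffix alphabet := by
  induction suffix generalizing prefix_ with
  | nil => simp [get_possible_words, get_possible_words_alt, pvProduct]
  | cons s rest ih =>
    by_cases hs : s == "X"
    · simp only [get_possible_words, get_possible_words_alt, hs, if_pos, List.map_cons,
        pvProduct, foldl_append_recursive, List.nil_append]
      rw [List.flatMap_congr (fun a _ => ih (prefix_ ++ [a]))]
      simp [get_possible_words_alt, List.map_flatMap, Function.comp_def, List.append_assoc]
    · simp only [get_possible_words, get_possible_words_alt, hs, if_neg, List.map_cons,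
        pvProduct, List.nil_append, Bool.false_eq_true, not_false_iff]
      rw [ih (prefix_ ++ [s])]
      simp [get_possible_words_alt, List.append_assoc]

-- ===== VERDICT (by name: the statement is the Claim_ definition above) =====
theorem get_possible_words_spec : Claim_equal_get_possible_words := by
  intro p s a _
  unfold Spec_get_possible_words
  exact get_possible_words_eq_alt s p a
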